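-- pv_equiv track=rewrite | github.com/jneo8/snap-openstack | sunbeam-python/sunbeam/steps/openstack.py | compute_resources_for_service
-- ===== SOURCE A (Python) =====
-- MB_BYTES_PER_CONNECTION = 12
--
-- def compute_resources_for_service(
--     database: dict[str, int], max_pool_size: int
-- ) -> tuple[int, int]:
--     """Compute resources needed for a single unit service."""
--     memory_needed = 0
--     total_connections = 0
--     for process in database.values():
--         # each service needs, in the worst case, max_pool_size connections
--         # per process, plus one for its mysql router
--         nb_connections = max_pool_size * process + 1
--         total_connections += nb_connections
--         memory_needed += nb_connections * MB_BYTES_PER_CONNECTION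
--     return total_connections, memory_needed
-- ===== SOURCE B (Python) =====
-- MB_BYTES_PER_CONNECTION = 12
--
-- def compute_resources_for_service(database, max_pool_size):
--     """Compute resources needed for a single unit service."""
--     def go(vals):
--         # divide-and-conquer: combine results of the two halves componentwise
--         if len(vals) <= 1:
--             if not vals:
--                 return (0, 0)
--             nb = max_pool_size * vals[0] + 1
--             return (nb, nb * MB_BYTES_PER_CONNECTION)
--         mid = len(vals) // 2
--         lc, lm = go(vals[:mid])
--         rc, rm = go(vals[mid:])
--         return (lc + rc, lm + rm)
--     return go(list(database.values()))
-- ===== Notes on version B (the rewrite author's own statement) =====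
-- stated objective: alternative
-- what changed: Replaces the left-to-right accumulation loop over two running totals with a divide-and-conquer recursion that splits the values list in half and combines the two subresults componentwise (correct because both components are sums, which are associative).
import Mathlib
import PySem

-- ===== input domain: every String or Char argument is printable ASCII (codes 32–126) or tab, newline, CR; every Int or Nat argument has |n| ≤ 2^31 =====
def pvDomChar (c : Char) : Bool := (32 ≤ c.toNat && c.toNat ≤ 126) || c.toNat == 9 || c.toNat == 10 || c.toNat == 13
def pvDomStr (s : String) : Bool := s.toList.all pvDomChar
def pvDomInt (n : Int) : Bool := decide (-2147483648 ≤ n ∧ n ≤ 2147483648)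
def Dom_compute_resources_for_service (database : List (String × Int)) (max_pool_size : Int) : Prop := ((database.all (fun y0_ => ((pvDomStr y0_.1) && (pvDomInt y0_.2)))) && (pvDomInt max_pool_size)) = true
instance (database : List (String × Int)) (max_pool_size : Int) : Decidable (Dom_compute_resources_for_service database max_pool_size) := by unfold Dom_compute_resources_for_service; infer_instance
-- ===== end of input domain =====

-- B replaces A's accumulator loop with a divide-and-conquer recursion over the values; alternative decomposition, same cost.

-- ===== PORT A =====
-- Literal port of A: fold over database.values() carrying (memory_needed, total_connections).
def compute_resources_for_service (database : List (String × Int)) (max_pool_size : Int) : Int × Int :=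
  let st := database.foldl (fun (st : Int × Int) kv =>
    let nb_connections := max_pool_size * kv.2 + 1
    (st.1 + nb_connections * 12, st.2 + nb_connections)) (0, 0)
  (st.2, st.1)

-- ===== PORT B =====
-- B's helper go: split the values list in half, recurse, combine componentwise.
def crfsGo (m : Int) (vs : List Int) : Int × Int :=
  if h : vs.length ≤ 1 then
    match vs with
    | [] => (0, 0)
    | v :: _ =>
      let nb := m * v + 1
      (nb, nb * 12)
  else
    let mid := vs.length / 2
    let l := crfsGo m (vs.take mid)
    let r := crfsGo m (vs.drop mid)
    (l.1 + r.1, l.2 + r.2)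
termination_by vs.length
decreasing_by
  · simp only [List.length_take]; omega
  · simp only [List.length_drop]; omega

def compute_resources_for_service_alt (database : List (String × Int)) (max_pool_size : Int) : Int × Int :=
  crfsGo max_pool_size (database.map Prod.snd)

-- ===== PRECONDITION & SPEC =====
def Spec_compute_resources_for_service (database : List (String × Int)) (max_pool_size : Int) (out : Int × Int) : Prop := out = compute_resources_for_service_alt database max_pool_size
instance (database : List (String × Int)) (max_pool_size : Int) (out : Int × Int) : Decidable (Spec_compute_resources_for_service database max_pool_size out) := by unfold Spec_compute_resources_for_service; infer_instance

-- ===== CLAIM =====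
def Claim_equal_compute_resources_for_service : Prop := ∀ (database : List (String × Int)) (max_pool_size : Int), Dom_compute_resources_for_service database max_pool_size → Spec_compute_resources_for_service database max_pool_size (compute_resources_for_service database max_pool_size)

-- ===== LEMMAS AND PROOFS =====
-- Both sides equal the closed form (m*sum + len, (m*sum + len)*12).
lemma crfsGo_closed (m : Int) (vs : List Int) :
    crfsGo m vs = (m * vs.sum + vs.length, (m * vs.sum + vs.length) * 12) := by
  induction hn : vs.length using Nat.strong_induction_on generalizing vs with
  | _ n ih =>
    subst hn
    rw [crfsGo]
    by_cases h : vs.length ≤ 1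
    · simp only [h, dite_true]
      match vs, h with
      | [], _ => simp
      | [v], _ => simp
      | a :: b :: t, h => simp at h
    · simp only [h, dite_false]
      have h2 : 2 ≤ vs.length := by omega
      rw [ih (vs.take (vs.length / 2)).length (by simp; omega) _ rfl,
          ih (vs.drop (vs.length / 2)).length (by simp; omega) _ rfl]
      have hsum : (vs.take (vs.length / 2)).sum + (vs.drop (vs.length / 2)).sum = vs.sum := by
        rw [← List.sum_append, List.take_append_drop]
      have hlen : ((vs.take (vs.length / 2)).length : Int) + ((vs.drop (vs.length / 2)).length : Int) = (vs.length : Int) := by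
        simp only [List.length_take, List.length_drop]; push_cast; omega
      simp only [Prod.mk.injEq]
      constructor <;> (rw [← hsum, ← hlen]; ring)

lemma crfs_fold (database : List (String × Int)) (m a b : Int) :
    database.foldl (fun (st : Int × Int) kv =>
      let nb := m * kv.2 + 1
      (st.1 + nb * 12, st.2 + nb)) (a, b)
    = (a + (m * (database.map Prod.snd).sum + database.length) * 12,
       b + m * (database.map Prod.snd).sum + database.length) := by
  induction database generalizing a b with
  | nil => simp
  | cons hd tl ih =>
    simp only [List.foldl_cons, List.map_cons, List.sum_cons, List.length_cons, ih]
    simp only [Prod.mk.injEq]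
    constructor <;> push_cast <;> ring

-- ===== VERDICT =====
theorem compute_resources_for_service_spec : Claim_equal_compute_resources_for_service := by
  intro database max_pool_size _
  unfold Spec_compute_resources_for_service compute_resources_for_service compute_resources_for_service_alt
  simp only [crfs_fold, crfsGo_closed, List.length_map, Prod.mk.injEq]
  constructor <;> ring
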